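-- pv_equiv track=rewrite | github.com/jaabberwocky/leetcode | leetcode/TopInterviewProblems/MinDeletionSize.py | isColSorted
-- ===== SOURCE A (Python) =====
-- from typing import List
--
-- def isColSorted(A: List[str], ind) -> bool:
--     col = []
--     for i in A:
--         col.append(i[ind])
--     for ind, j in enumerate(col):
--         if ind == 0:
--             next
--         else:
--             if j < col[ind-1]:
--                 return False
--     return True
-- ===== SOURCE B (Python) =====
-- def isColSorted(A, ind) -> bool:
--     col = [row[ind] for row in A]
--     return col == sorted(col)
-- ===== Notes on version B (the rewrite author's own statement) =====
-- stated objective: idiomatic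
-- what changed: Replaces the explicit index-based adjacent-pair scan over an enumerate loop with building the column and comparing it to its stable sort (col == sorted(col)).
import Mathlib
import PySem

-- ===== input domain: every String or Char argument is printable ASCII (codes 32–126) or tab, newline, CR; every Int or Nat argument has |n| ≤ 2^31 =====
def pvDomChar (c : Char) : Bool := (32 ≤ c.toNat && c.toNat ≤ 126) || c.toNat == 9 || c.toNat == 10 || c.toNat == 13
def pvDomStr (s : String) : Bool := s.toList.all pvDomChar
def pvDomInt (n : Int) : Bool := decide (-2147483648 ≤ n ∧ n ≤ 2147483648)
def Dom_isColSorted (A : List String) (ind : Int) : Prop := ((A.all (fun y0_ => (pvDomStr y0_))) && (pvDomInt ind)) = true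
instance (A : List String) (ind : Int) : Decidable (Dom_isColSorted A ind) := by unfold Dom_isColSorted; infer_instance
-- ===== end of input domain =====

-- B replaces A's index-based adjacent-pair scan by comparing the column with its sorted copy (idiomatic; return value only).

-- ===== PORT A =====
-- the 'for ind, j in enumerate(col)' loop with its early 'return False'
def isColSortedLoop (col : List Char) (ps : List (Int × Char)) : Bool :=
  match ps with
  | [] => true
  | (i, j) :: rest =>
    if i == 0 then isColSortedLoop col rest
    else if j < PySem.List.pyGetD col (i - 1) ' ' then false
    else isColSortedLoop col rest

def isColSorted (A : List String) (ind : Int) : Bool :=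
  let col := A.map (fun s => PySem.List.pyGetD s.toList ind ' ')
  isColSortedLoop col (PySem.List.enumerate col 0)

-- ===== PORT B =====
def isColSorted_alt (A : List String) (ind : Int) : Bool :=
  let col := A.map (fun s => PySem.List.pyGetD s.toList ind ' ')
  decide (col = PySem.List.sorted col (fun x => x) false)

-- ===== PRECONDITION & SPEC =====
-- Pre_ excludes exactly the inputs where row[ind] raises IndexError for some row.
def Pre_isColSorted (A : List String) (ind : Int) : Prop :=
  ∀ s ∈ A, PySem.Raise.InRange s.toList.length ind
instance (A : List String) (ind : Int) : Decidable (Pre_isColSorted A ind) := by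
  unfold Pre_isColSorted; infer_instance
def pvWitness_isColSorted : List String × Int := (["ab", "cd"], 1)

def Spec_isColSorted (A : List String) (ind : Int) (out : Bool) : Prop := out = isColSorted_alt A ind
instance (A : List String) (ind : Int) (out : Bool) : Decidable (Spec_isColSorted A ind out) := by unfold Spec_isColSorted; infer_instance

-- ===== CLAIM (what is proved, stated in full; the proofs are below) =====
def Claim_equal_isColSorted : Prop := ∀ (A : List String) (ind : Int), Dom_isColSorted A ind → Pre_isColSorted A ind → Spec_isColSorted A ind (isColSorted A ind)

-- ===== LEMMAS AND PROOFS =====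

-- boolean adjacent-pair check, used only to describe A's scan
def nondecB : List Char → Bool
  | [] => true
  | [_] => true
  | a :: b :: rest => (a ≤ b) && nondecB (b :: rest)

lemma nondecB_iff_pairwise (col : List Char) :
    nondecB col = true ↔ col.Pairwise (· ≤ ·) := by
  induction col with
  | nil => simp [nondecB]
  | cons a rest ih =>
    cases rest with
    | nil => simp [nondecB]
    | cons b rest2 =>
      rw [show nondecB (a :: b :: rest2) = ((a ≤ b) && nondecB (b :: rest2)) from rfl]
      rw [Bool.and_eq_true, decide_eq_true_iff, ih]
      rw [← List.isChain_iff_pairwise, ← List.isChain_iff_pairwise]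
      exact (List.isChain_cons_cons).symm

-- the scan over enumerate suf (|pre|+1), inside the list pre ++ p :: suf, checks nondecB (p :: suf)
lemma isColSortedLoop_aux (suf pre : List Char) (p : Char) :
    isColSortedLoop (pre ++ p :: suf) (PySem.List.enumerate suf ((pre.length : Int) + 1))
      = nondecB (p :: suf) := by
  induction suf generalizing pre p with
  | nil => simp [isColSortedLoop, PySem.List.enumerate, nondecB]
  | cons x suf ih =>
    rw [PySem.List.enumerate_cons]
    have hi0 : (((pre.length : Int) + 1) == 0) = false := by
      simp; omega
    have hget : PySem.List.pyGetD (pre ++ p :: x :: suf) ((pre.length : Int) + 1 - 1) ' ' = p := by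
      have h1 : (pre.length : Int) + 1 - 1 = (pre.length : Int) := by ring
      rw [h1, PySem.List.pyGetD_natCast]
      simp [List.getD]
    simp only [isColSortedLoop, hi0, Bool.false_eq_true, if_false]
    rw [hget]
    by_cases hxp : x < p
    · rw [if_pos (by exact hxp)]
      have : ¬ p ≤ x := not_le.mpr hxp
      simp [nondecB, this]
    · rw [if_neg hxp]
      have hidx : (pre.length : Int) + 1 + 1 = ((pre ++ [p]).length : Int) + 1 := by
        simp
      have hl : pre ++ p :: x :: suf = (pre ++ [p]) ++ x :: suf := by simp
      rw [hidx, hl, ih (pre ++ [p]) x]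
      have : p ≤ x := not_lt.mp hxp
      simp [nondecB, this]

lemma isColSorted_eq_chain (col : List Char) :
    isColSortedLoop col (PySem.List.enumerate col 0) = nondecB col := by
  cases col with
  | nil => simp [isColSortedLoop, PySem.List.enumerate, nondecB]
  | cons c rest =>
    rw [PySem.List.enumerate_cons]
    have h0 : ((0 : Int) == 0) = true := by decide
    simp only [isColSortedLoop, h0, if_true]
    have := isColSortedLoop_aux rest [] c
    simpa using this

lemma nondec_iff_sorted_eq (col : List Char) :
    nondecB col = true ↔ col = PySem.List.sorted col (fun x => x) false := by
  rw [nondecB_iff_pairwise]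
  constructor
  · intro hp
    have hp' : col.Pairwise (fun a b => (fun x : Char => x) a ≤ (fun x : Char => x) b) := hp
    exact (PySem.List.sorted_eq_self_of_pairwise col (fun x => x) hp').symm
  · intro h
    have hp : col.Pairwise (fun a b => (fun x : Char => x) a ≤ (fun x : Char => x) b) := by
      rw [h]; exact PySem.List.sorted_pairwise col (fun x => x)
    exact hp

lemma nondecB_eq_decide (col : List Char) :
    nondecB col = decide (col = PySem.List.sorted col (fun x => x) false) := by
  rw [Bool.eq_iff_iff, decide_eq_true_iff]
  exact nondec_iff_sorted_eq col

-- ===== VERDICT (by name: the statement is the Claim_ definition above) =====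
theorem isColSorted_spec : Claim_equal_isColSorted := by
  intro A ind _ _
  unfold Spec_isColSorted isColSorted isColSorted_alt
  rw [isColSorted_eq_chain, nondecB_eq_decide]
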